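-- pv_equiv track=rewrite | github.com/JoaoAssalim/Beecrowd-Solution | Python/3098.py | encontrar_maior_plindromo
-- ===== SOURCE A (Python) =====
-- def encontrar_maior_plindromo(palavra):
--     tamanho = len(palavra)
--     matriz = [[0] * tamanho for _ in range(tamanho)]
--
--     for i in range(tamanho):
--         matriz[i][i] = 1 if palavra[i] != 'a' else 0
--
--     for sublen in range(2, tamanho + 1):
--         for i in range(tamanho - sublen + 1):
--             j = i + sublen - 1
--             if palavra[i] == palavra[j] and palavra[i] != 'a' and palavra[j] != 'a':
--                 matriz[i][j] = matriz[i + 1][j - 1] + 2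
--             else:
--                 matriz[i][j] = max(matriz[i + 1][j], matriz[i][j - 1])
--
--     return matriz[0][tamanho - 1]
-- ===== SOURCE B (Python) =====
-- def encontrar_maior_plindromo(palavra):
--     s = [c for c in palavra if c != 'a']
--     n = len(s)
--     nxt = [0] * (n + 1)  # nxt[j] = best for s[i+1:j]
--     for i in range(n - 1, -1, -1):
--         cur = [0] * (n + 1)
--         run = 1  # best value using s[i]: alone, or matched with some s[k], i < k < j
--         for j in range(i + 1, n + 1):
--             cur[j] = max(nxt[j], run)
--             if j < n and s[j] == s[i]:
--                 run = max(run, 2 + nxt[j])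
--         nxt = cur
--     return nxt[n]
-- ===== Notes on version B (the rewrite author's own statement) =====
-- stated objective: faster
-- what changed: B first deletes all occurrences of the letter a, then runs a suffix DP with a different recurrence: for each suffix it matches the FIRST character against each later equal character, keeping a running maximum of 2 + best-of-the-gap candidates in a 1-D row, instead of A's two-ends interval DP over an n x n matrix (compare s[i] with s[j], max of dropping either end).
import Mathlib
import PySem

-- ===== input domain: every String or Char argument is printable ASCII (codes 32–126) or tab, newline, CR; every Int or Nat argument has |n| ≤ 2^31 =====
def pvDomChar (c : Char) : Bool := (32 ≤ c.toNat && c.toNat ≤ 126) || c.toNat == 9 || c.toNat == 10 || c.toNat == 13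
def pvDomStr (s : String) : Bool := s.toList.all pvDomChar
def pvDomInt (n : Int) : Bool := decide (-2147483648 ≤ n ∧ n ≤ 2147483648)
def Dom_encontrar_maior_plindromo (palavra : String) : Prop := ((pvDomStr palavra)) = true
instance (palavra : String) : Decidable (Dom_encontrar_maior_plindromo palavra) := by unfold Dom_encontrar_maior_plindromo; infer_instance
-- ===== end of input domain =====

-- B first deletes all occurrences of the letter a and then runs a different DP: for each suffix
-- it matches the FIRST character against each later equal character with a running maximum in a
-- 1-D row, instead of A's two-ends n×n interval DP (measured constant-factor speedup).

-- ===== PORT A =====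
-- matriz[i][j] read / write on a list-of-lists (indices in range wherever A executes them)
def pvGet2 (m : List (List Int)) (i j : Nat) : Int := (m.getD i []).getD j 0
def pvSet2 (m : List (List Int)) (i j : Nat) (v : Int) : List (List Int) :=
  m.set i ((m.getD i []).set j v)

-- inner 'for i in range(tamanho - sublen + 1)' loop of A
def pvInner (p : List Char) (sublen : Nat) (m : List (List Int)) : List (List Int) :=
  (List.range (p.length - sublen + 1)).foldl (fun m i =>
    let j := i + sublen - 1
    if p.getD i ' ' = p.getD j ' ' ∧ p.getD i ' ' ≠ 'a' ∧ p.getD j ' ' ≠ 'a'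
    then pvSet2 m i j (pvGet2 m (i+1) (j-1) + 2)
    else pvSet2 m i j (max (pvGet2 m (i+1) j) (pvGet2 m i (j-1)))) m

-- range(a, b) with 0 ≤ a ≤ b, step 1, is List.range' a (b - a); range(n) is List.range n
def encontrar_maior_plindromo (palavra : String) : Int :=
  let p := palavra.toList
  let tamanho := p.length
  let matriz : List (List Int) := List.replicate tamanho (List.replicate tamanho 0)
  let matriz := (List.range tamanho).foldl
    (fun m i => pvSet2 m i i (if p.getD i ' ' ≠ 'a' then 1 else 0)) matriz
  let matriz := (List.range' 2 (tamanho - 1)).foldl (fun m sublen => pvInner p sublen m) matriz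
  pvGet2 matriz 0 (tamanho - 1)

-- ===== PORT B =====
-- inner 'for j in range(i + 1, n + 1)' loop of B: state is the pair (cur, run)
def pvBRow (s : List Char) (n i : Nat) (nxt : List Int) : List Int × Int :=
  (List.range' (i+1) (n - i)).foldl (fun (p : List Int × Int) j =>
    let cur := p.1.set j (max (nxt.getD j 0) p.2)
    let run := if j < n ∧ s.getD j ' ' = s.getD i ' ' then max p.2 (2 + nxt.getD j 0) else p.2
    (cur, run))
    (List.replicate (n+1) 0, 1)

-- range(n - 1, -1, -1) is (List.range n).reverse
def encontrar_maior_plindromo_alt (palavra : String) : Int :=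
  let s := palavra.toList.filter (fun c => c ≠ 'a')
  let n := s.length
  let nxt := (List.range n).reverse.foldl (fun nxt i => (pvBRow s n i nxt).1)
    (List.replicate (n+1) 0)
  nxt.getD n 0

-- ===== PRECONDITION & SPEC =====
-- A raises IndexError on the empty string (it reads matriz[0][-1] of an empty matriz); Pre_ excludes exactly that input.
def Pre_encontrar_maior_plindromo (palavra : String) : Prop := palavra ≠ ""
instance (palavra : String) : Decidable (Pre_encontrar_maior_plindromo palavra) := by
  unfold Pre_encontrar_maior_plindromo; infer_instance
def pvWitness_encontrar_maior_plindromo : String := "bcxcb"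

def Spec_encontrar_maior_plindromo (palavra : String) (out : Int) : Prop := out = encontrar_maior_plindromo_alt palavra
instance (palavra : String) (out : Int) : Decidable (Spec_encontrar_maior_plindromo palavra out) := by unfold Spec_encontrar_maior_plindromo; infer_instance

-- ===== CLAIM (what is proved, stated in full; the proofs are below) =====
def Claim_equal_encontrar_maior_plindromo : Prop := ∀ (palavra : String), Dom_encontrar_maior_plindromo palavra → Pre_encontrar_maior_plindromo palavra → Spec_encontrar_maior_plindromo palavra (encontrar_maior_plindromo palavra)

-- ===== LEMMAS AND PROOFS =====

-- the common value: weighted longest palindromic subsequence, 'a' worth 0 and never matched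
def pvG : List Char → Nat
  | [] => 0
  | [x] => if x = 'a' then 0 else 1
  | x :: y :: rest =>
    let xs := y :: rest
    if x = xs.getLast (by simp) ∧ x ≠ 'a'
    then pvG (xs.dropLast) + 2
    else max (pvG xs) (pvG (x :: xs.dropLast))
termination_by l => l.length
decreasing_by all_goals (simp [List.length_dropLast]; try omega)

-- the contiguous segment palavra[i..j] (inclusive)
def pvSeg (p : List Char) (i j : Nat) : List Char := (p.drop i).take (j + 1 - i)

theorem pvG_cons (x : Char) (xs : List Char) (h : xs ≠ []) :
    pvG (x :: xs) = if x = xs.getLast h ∧ x ≠ 'a'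
      then pvG (xs.dropLast) + 2
      else max (pvG xs) (pvG (x :: xs.dropLast)) := by
  cases xs with
  | nil => simp at h
  | cons y rest => rw [pvG]

theorem pvG_pal (x : Char) (m : List Char) (hx : x ≠ 'a') :
    pvG (x :: m ++ [x]) = pvG m + 2 := by
  rw [List.cons_append, pvG_cons x (m ++ [x]) (by simp)]
  simp [List.dropLast_concat, hx]

theorem pvG_max (x y : Char) (m : List Char) (h : ¬ (x = y ∧ x ≠ 'a')) :
    pvG (x :: m ++ [y]) = max (pvG (m ++ [y])) (pvG (x :: m)) := by
  rw [List.cons_append, pvG_cons x (m ++ [y]) (by simp)]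
  simp [List.getLast_concat, h]

-- monotonicity / 2-Lipschitz at either end
theorem pvG_bounds (l : List Char) :
    pvG l.tail ≤ pvG l ∧ pvG l.dropLast ≤ pvG l ∧
    pvG l ≤ pvG l.tail + 2 ∧ pvG l ≤ pvG l.dropLast + 2 := by
  generalize hn : l.length = n
  induction n using Nat.strong_induction_on generalizing l with
  | _ n ih =>
    match l, hn with
    | [], hn => simp [pvG]
    | [x], hn => simp [pvG]; split <;> omega
    | x :: y :: rest, hn =>
      set xs := y :: rest with hxsdef
      have hxs : xs ≠ [] := by simp [hxsdef]
      set z := xs.getLast hxs with hz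
      set m := xs.dropLast with hm
      have hsplit : m ++ [z] = xs := List.dropLast_concat_getLast hxs
      have hn2 : n = rest.length + 2 := by simpa using hn.symm
      have hlen : xs.length = n - 1 := by simp [hxsdef]; omega
      have hlenm : m.length = n - 2 := by
        have := congrArg List.length hsplit; simp [hlen] at this; omega
      have ihxs := ih (n-1) (by omega) xs hlen
      have ihxm := ih (n-1) (by omega) (x :: m) (by simp [hlenm]; omega)
      rw [show (x :: y :: rest).tail = xs from rfl,
          show (x :: y :: rest).dropLast = x :: m from by
            rw [hm, hxsdef]; rfl]
      rw [pvG_cons x xs hxs, ← hz, ← hm]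
      simp only [List.tail_cons] at ihxm
      rw [← hm] at ihxs
      split
      · refine ⟨?_, ?_, ?_, ?_⟩
        · calc pvG xs ≤ pvG m + 2 := ihxs.2.2.2
            _ = pvG m + 2 := rfl
        · exact ihxm.2.2.1
        · have : pvG m ≤ pvG xs := ihxs.2.1
          omega
        · have : pvG m ≤ pvG (x :: m) := ihxm.1
          omega
      · refine ⟨le_max_left _ _, le_max_right _ _, ?_, ?_⟩
        · have h1 : pvG (x :: m) ≤ pvG m + 2 := ihxm.2.2.1
          have h2 : pvG m ≤ pvG xs := ihxs.2.1
          simp only [max_le_iff]; omega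
        · have h1 : pvG xs ≤ pvG m + 2 := ihxs.2.2.2
          have h2 : pvG m ≤ pvG (x :: m) := ihxm.1
          simp only [max_le_iff]; omega

theorem pvG_cons_a (m : List Char) : pvG ('a' :: m) = pvG m := by
  generalize hn : m.length = n
  induction n using Nat.strong_induction_on generalizing m with
  | _ n ih =>
    match m, hn with
    | [], _ => simp [pvG]
    | y :: rest, hn =>
      have hne : (y :: rest) ≠ [] := by simp
      rw [pvG_cons 'a' (y :: rest) hne]
      have hd : ((y :: rest).dropLast).length < n := by
        simp [List.length_dropLast] at *; omega
      rw [if_neg (by simp)]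
      rw [ih _ hd _ rfl]
      have := pvG_bounds (y :: rest)
      have h2 : pvG (y :: rest).dropLast ≤ pvG (y :: rest) := this.2.1
      omega

theorem pvG_concat_a (m : List Char) : pvG (m ++ ['a']) = pvG m := by
  induction m with
  | nil => simp [pvG]
  | cons x xs ih =>
    rw [List.cons_append, pvG_cons x (xs ++ ['a']) (by simp)]
    rw [if_neg (by simp)]
    rw [List.dropLast_concat, ih]
    have := (pvG_bounds (x :: xs)).1
    simp at this ⊢
    omega

theorem pvG_filter (l : List Char) : pvG l = pvG (l.filter (fun c => c ≠ 'a')) := by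
  generalize hn : l.length = n
  induction n using Nat.strong_induction_on generalizing l with
  | _ n ih =>
    match l, hn with
    | [], _ => simp
    | [x], _ => by_cases hx : x = 'a' <;> simp [hx, pvG]
    | x :: y :: rest, hn =>
      set xs := y :: rest with hxsdef
      have hxs : xs ≠ [] := by simp [hxsdef]
      set z := xs.getLast hxs with hz
      set m := xs.dropLast with hm
      have hsplit : m ++ [z] = xs := List.dropLast_concat_getLast hxs
      have hn2 : n = rest.length + 2 := by simpa using hn.symm
      have hlen : xs.length = n - 1 := by simp [hxsdef]; omega
      have hlenm : m.length = n - 2 := by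
        have := congrArg List.length hsplit; simp [hlen] at this; omega
      by_cases hx : x = 'a'
      · subst hx
        rw [pvG_cons_a, List.filter_cons_of_neg (by simp)]
        exact ih (n-1) (by omega) xs hlen
      · by_cases hzz : z = 'a'
        · have hxs_eq : xs = m ++ ['a'] := by rw [← hzz]; exact hsplit.symm
          rw [pvG_cons x xs hxs, ← hz, ← hm, if_neg (by rw [← hzz] at hx ⊢; tauto)]
          have hfil : (x :: xs).filter (fun c => c ≠ 'a') = (x :: m).filter (fun c => c ≠ 'a') := by
            rw [hxs_eq, ← List.cons_append, List.filter_append]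
            simp
          have h1 : pvG xs = pvG m := by rw [hxs_eq, pvG_concat_a]
          have h2 : pvG m ≤ pvG (x :: m) := by
            have := (pvG_bounds (x :: m)).1; simpa using this
          rw [hfil, h1, max_eq_right h2]
          exact ih (n-1) (by omega) (x :: m) (by simp [hlenm]; omega)
        · have hxs_eq : xs = m ++ [z] := hsplit.symm
          have hfil : (x :: xs).filter (fun c => c ≠ 'a')
              = x :: (m.filter (fun c => c ≠ 'a') ++ [z]) := by
            rw [hxs_eq]; simp [hx, hzz]
          rw [hfil]
          by_cases hxz : x = z
          · have hA : pvG (x :: xs) = pvG m + 2 := by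
              rw [hxs_eq, ← hxz, ← List.cons_append]; exact pvG_pal x m hx
            have hB : pvG (x :: (m.filter (fun c => c ≠ 'a') ++ [z]))
                = pvG (m.filter (fun c => c ≠ 'a')) + 2 := by
              rw [← hxz, ← List.cons_append]; exact pvG_pal x _ hx
            rw [hA, hB, ih (n-2) (by omega) m hlenm]
          · have hA : pvG (x :: xs) = max (pvG (m ++ [z])) (pvG (x :: m)) := by
              rw [hxs_eq, ← List.cons_append]; exact pvG_max x z m (by tauto)
            have hB : pvG (x :: (m.filter (fun c => c ≠ 'a') ++ [z]))
                = max (pvG (m.filter (fun c => c ≠ 'a') ++ [z]))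
                      (pvG (x :: m.filter (fun c => c ≠ 'a'))) := by
              rw [← List.cons_append]; exact pvG_max x z _ (by tauto)
            rw [hA, hB, ih (n-1) (by omega) (m ++ [z]) (by simp [hlenm]; omega),
                ih (n-1) (by omega) (x :: m) (by simp [hlenm]; omega)]
            congr 1
            · rw [List.filter_append]; simp [hzz]
            · rw [List.filter_cons_of_pos (by simp [hx])]

-- segment facts
theorem pvSeg_lt (p : List Char) (i j : Nat) (h : j < i) : pvSeg p i j = [] := by
  unfold pvSeg
  rw [show j + 1 - i = 0 from by omega]
  simp
theorem pvSeg_self (p : List Char) (i : Nat) (h : i < p.length) :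
    pvSeg p i i = [p.getD i ' '] := by
  unfold pvSeg
  rw [show i + 1 - i = 1 from by omega]
  rw [List.getD_eq_getElem _ _ h]
  rw [List.take_one, List.head?_drop]
  simp [List.getElem?_eq_getElem h]
theorem pvSeg_cons (p : List Char) (i j : Nat) (h1 : i ≤ j) (h2 : j < p.length) :
    pvSeg p i j = p.getD i ' ' :: pvSeg p (i+1) j := by
  unfold pvSeg
  have hi : i < p.length := by omega
  rw [List.getD_eq_getElem _ _ hi]
  rw [show p.drop i = p[i] :: p.drop (i+1) from (List.drop_eq_getElem_cons hi)]
  rw [show j + 1 - i = (j + 1 - (i+1)) + 1 from by omega]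
  rfl
theorem pvSeg_snoc (p : List Char) (i j : Nat) (h0 : 1 ≤ j) (h1 : i ≤ j) (h2 : j < p.length) :
    pvSeg p i j = pvSeg p i (j-1) ++ [p.getD j ' '] := by
  unfold pvSeg
  rw [show j - 1 + 1 - i = j - i from by omega, show j + 1 - i = (j - i) + 1 from by omega]
  rw [List.take_add_one]
  congr 1
  rw [List.getElem?_drop]
  rw [show i + (j - i) = j from by omega]
  simp [List.getElem?_eq_getElem h2]
theorem pvSeg_full (p : List Char) (h : p ≠ []) : pvSeg p 0 (p.length - 1) = p := by
  unfold pvSeg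
  have : 1 ≤ p.length := by cases p <;> simp_all
  rw [show p.length - 1 + 1 - 0 = p.length from by omega]
  simp

-- the DP recurrence, in terms of pvG
theorem pvG_step (p : List Char) (i j : Nat) (hij : i < j) (hj : j < p.length) :
    pvG (pvSeg p i j) =
      if p.getD i ' ' = p.getD j ' ' ∧ p.getD i ' ' ≠ 'a'
      then pvG (pvSeg p (i+1) (j-1)) + 2
      else max (pvG (pvSeg p (i+1) j)) (pvG (pvSeg p i (j-1))) := by
  have hsnoc : pvSeg p (i+1) j = pvSeg p (i+1) (j-1) ++ [p.getD j ' '] :=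
    pvSeg_snoc p (i+1) j (by omega) (by omega) hj
  have hconsj : pvSeg p i (j-1) = p.getD i ' ' :: pvSeg p (i+1) (j-1) :=
    pvSeg_cons p i (j-1) (by omega) (by omega)
  rw [pvSeg_cons p i j (by omega) hj, hsnoc, ← List.cons_append]
  split
  · rename_i hc
    rw [← hc.1, pvG_pal _ _ hc.2]
  · rename_i hc
    rw [pvG_max _ _ _ hc, hconsj]

-- matrix access lemmas
theorem getD_set_self {α : Type} (l : List α) (i : Nat) (v d : α) (h : i < l.length) :
    (l.set i v).getD i d = v := by
  simp [List.getD, h]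

theorem getD_set_ne {α : Type} (l : List α) (i k : Nat) (v d : α) (h : k ≠ i) :
    (l.set i v).getD k d = l.getD k d := by
  rw [List.getD, List.getD, List.getElem?_set_ne (Ne.symm h)]

theorem pvSet2_length (m : List (List Int)) (i j : Nat) (v : Int) :
    (pvSet2 m i j v).length = m.length := by simp [pvSet2]
theorem pvSet2_row_length (m : List (List Int)) (i j : Nat) (v : Int) (i' : Nat) :
    ((pvSet2 m i j v).getD i' []).length = (m.getD i' []).length := by
  unfold pvSet2
  by_cases hi : i' = i
  · subst hi
    by_cases h : i' < m.length
    · rw [getD_set_self _ _ _ _ h]; simp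
    · rw [List.set_eq_of_length_le (by omega)]
  · rw [getD_set_ne _ _ _ _ _ hi]
theorem pvGet2_set2_self (m : List (List Int)) (i j : Nat) (v : Int)
    (hi : i < m.length) (hj : j < (m.getD i []).length) :
    pvGet2 (pvSet2 m i j v) i j = v := by
  unfold pvGet2 pvSet2
  rw [getD_set_self _ _ _ _ hi, getD_set_self _ _ _ _ hj]
theorem pvGet2_set2_ne (m : List (List Int)) (i j i' j' : Nat) (v : Int)
    (h : i' ≠ i ∨ j' ≠ j) :
    pvGet2 (pvSet2 m i j v) i' j' = pvGet2 m i' j' := by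
  unfold pvGet2 pvSet2
  by_cases hi : i' = i
  · subst hi
    have hj : j' ≠ j := by tauto
    by_cases hlen : i' < m.length
    · rw [getD_set_self _ _ _ _ hlen, getD_set_ne _ _ _ _ _ hj]
    · rw [List.set_eq_of_length_le (by omega)]
  · rw [getD_set_ne _ _ _ _ _ hi]

-- invariant of A's matrix after all sublens ≤ L have been processed
def pvMInv (p : List Char) (L : Nat) (M : List (List Int)) : Prop :=
  M.length = p.length ∧ (∀ i, i < p.length → (M.getD i []).length = p.length) ∧
  ∀ i j, i < p.length → j < p.length →
    pvGet2 M i j = if j + 1 - i ≤ L then (pvG (pvSeg p i j) : Int) else 0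

theorem getD_replicate' {α : Type} (n j : Nat) (a d : α) :
    (List.replicate n a).getD j d = if j < n then a else d := by
  rw [List.getD]
  simp only [List.getElem?_replicate]
  split <;> simp_all

theorem pvGet2_replicate (n i j : Nat) :
    pvGet2 (List.replicate n (List.replicate n (0:Int))) i j = 0 := by
  unfold pvGet2
  rw [getD_replicate']
  split
  · rw [getD_replicate']; split <;> rfl
  · simp [List.getD]

theorem pvMInv_diag_partial (p : List Char) (k : Nat) (hk : k ≤ p.length) :
    ∀ M, M = (List.range k).foldl
      (fun m i => pvSet2 m i i (if p.getD i ' ' ≠ 'a' then 1 else 0))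
      (List.replicate p.length (List.replicate p.length 0)) →
    M.length = p.length ∧ (∀ i, i < p.length → (M.getD i []).length = p.length) ∧
    ∀ i j, i < p.length → j < p.length →
      pvGet2 M i j = if i = j ∧ i < k then (if p.getD i ' ' ≠ 'a' then 1 else 0) else 0 := by
  induction k with
  | zero =>
    intro M hM
    subst hM
    simp only [List.range_zero, List.foldl_nil]
    refine ⟨by simp, ?_, ?_⟩
    · intro i h
      rw [List.getD_eq_getElem _ _ (by simpa using h)]
      simp
    · intro i j hi hj
      simp only [Nat.not_lt_zero, and_false, if_false]
      exact pvGet2_replicate _ _ _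
  | succ k ih =>
    intro M hM
    obtain ⟨h1, h2, h3⟩ := ih (by omega) _ rfl
    rw [List.range_succ, List.foldl_append, List.foldl_cons, List.foldl_nil] at hM
    subst hM
    refine ⟨by rw [pvSet2_length]; exact h1, ?_, ?_⟩
    · intro i hi
      rw [pvSet2_row_length]
      exact h2 i hi
    intro i j hi hj
    by_cases hij : i = k ∧ j = k
    · obtain ⟨rfl, rfl⟩ := hij
      rw [pvGet2_set2_self _ _ _ _ (by omega) (by rw [h2 _ hi]; omega)]
      simp
    · rw [pvGet2_set2_ne _ _ _ _ _ _ (by tauto), h3 i j hi hj]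
      by_cases h : i = j ∧ i < k
      · have h' : i = j ∧ i < k + 1 := ⟨h.1, by omega⟩
        rw [if_pos h, if_pos h']
      · rw [if_neg h, if_neg ?_]
        rintro ⟨rfl, hk'⟩
        exact h ⟨rfl, by
          rcases Nat.lt_succ_iff_lt_or_eq.mp hk' with h2' | h2'
          · exact h2'
          · exact absurd ⟨h2', h2'⟩ hij⟩

theorem pvMInv_diag (p : List Char) :
    pvMInv p 1 ((List.range p.length).foldl
      (fun m i => pvSet2 m i i (if p.getD i ' ' ≠ 'a' then 1 else 0))
      (List.replicate p.length (List.replicate p.length 0))) := by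
  obtain ⟨h1, h2, h3⟩ := pvMInv_diag_partial p p.length le_rfl _ rfl
  refine ⟨h1, h2, ?_⟩
  intro i j hi hj
  rw [h3 i j hi hj]
  by_cases hij : i = j
  · subst hij
    have e1 : (i = i ∧ i < p.length) := ⟨rfl, hi⟩
    have e2 : i + 1 - i ≤ 1 := by omega
    rw [if_pos e1, if_pos e2, pvSeg_self p i hi]
    generalize p.getD i ' ' = c
    by_cases ha : c = 'a' <;> simp [pvG, ha]
  · rw [if_neg (fun hc => hij hc.1)]
    by_cases hji : j < i
    · rw [if_pos (by omega), pvSeg_lt p i j hji]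
      simp [pvG]
    · rw [if_neg (by omega)]

def pvAStep (p : List Char) (L : Nat) (m : List (List Int)) (i : Nat) : List (List Int) :=
  if p.getD i ' ' = p.getD (i + (L+1) - 1) ' ' ∧ p.getD i ' ' ≠ 'a' ∧ p.getD (i + (L+1) - 1) ' ' ≠ 'a'
  then pvSet2 m i (i + (L+1) - 1) (pvGet2 m (i+1) ((i + (L+1) - 1) - 1) + 2)
  else pvSet2 m i (i + (L+1) - 1)
    (max (pvGet2 m (i+1) (i + (L+1) - 1)) (pvGet2 m i ((i + (L+1) - 1) - 1)))

theorem pvMInv_inner_partial (p : List Char) (L : Nat) (M : List (List Int))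
    (h1L : 1 ≤ L) (hL : L < p.length) (hM : pvMInv p L M) (k : Nat) (hk : k ≤ p.length - L) :
    ∀ M', M' = (List.range k).foldl (pvAStep p L) M →
    M'.length = p.length ∧ (∀ i, i < p.length → (M'.getD i []).length = p.length) ∧
    ∀ i j, i < p.length → j < p.length →
      pvGet2 M' i j = if j + 1 - i ≤ L ∨ (j = i + L ∧ i < k)
        then (pvG (pvSeg p i j) : Int) else 0 := by
  induction k with
  | zero =>
    intro M' hM'
    have hM'' : M' = M := by simpa using hM'
    subst hM''
    obtain ⟨h1, h2, h3⟩ := hM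
    refine ⟨h1, h2, ?_⟩
    intro i j hi hj
    rw [h3 i j hi hj]
    by_cases hc : j + 1 - i ≤ L
    · rw [if_pos hc, if_pos (Or.inl hc)]
    · rw [if_neg hc, if_neg (by rintro (h | ⟨_, h⟩) <;> omega)]
  | succ k ih =>
    intro M' hM'
    obtain ⟨h1, h2, h3⟩ := ih (by omega) _ rfl
    rw [List.range_succ, List.foldl_append, List.foldl_cons, List.foldl_nil] at hM'
    have hj0 : k + (L + 1) - 1 = k + L := by omega
    have hkL : k + L < p.length := by omega
    have hr1 : pvGet2 ((List.range k).foldl (pvAStep p L) M) (k+1) (k + L - 1)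
        = (pvG (pvSeg p (k+1) (k+L-1)) : Int) := by
      rw [h3 (k+1) (k+L-1) (by omega) (by omega), if_pos (Or.inl (by omega))]
    have hr2 : pvGet2 ((List.range k).foldl (pvAStep p L) M) (k+1) (k + L)
        = (pvG (pvSeg p (k+1) (k+L)) : Int) := by
      rw [h3 (k+1) (k+L) (by omega) hkL, if_pos (Or.inl (by omega))]
    have hr3 : pvGet2 ((List.range k).foldl (pvAStep p L) M) k (k + L - 1)
        = (pvG (pvSeg p k (k+L-1)) : Int) := by
      rw [h3 k (k+L-1) (by omega) (by omega), if_pos (Or.inl (by omega))]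
    have hMval : M' = pvSet2 ((List.range k).foldl (pvAStep p L) M) k (k+L)
        ((pvG (pvSeg p k (k+L)) : Int)) := by
      rw [hM', pvAStep]
      have hstep := pvG_step p k (k+L) (by omega) hkL
      rw [hj0]
      split
      · rename_i hc
        rw [hr1, hstep, if_pos ⟨hc.1, hc.2.1⟩]
        push_cast
        rfl
      · rename_i hc
        rw [hr2, hr3, hstep, if_neg (by rintro ⟨he, ha⟩; exact hc ⟨he, ha, he ▸ ha⟩)]
        congr 1
        push_cast
        rfl
    refine ⟨?_, ?_, ?_⟩
    · rw [hMval, pvSet2_length]; exact h1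
    · intro i hi
      rw [hMval, pvSet2_row_length]
      exact h2 i hi
    · intro i j hi hj
      by_cases hij : i = k ∧ j = k + L
      · obtain ⟨rfl, rfl⟩ := hij
        rw [hMval, pvGet2_set2_self _ _ _ _ (by omega) (by rw [h2 _ hi]; omega)]
        rw [if_pos (Or.inr ⟨rfl, by omega⟩)]
      · rw [hMval, pvGet2_set2_ne _ _ _ _ _ _ (by tauto), h3 i j hi hj]
        by_cases hc : j + 1 - i ≤ L ∨ (j = i + L ∧ i < k)
        · rw [if_pos hc, if_pos (by rcases hc with h | ⟨h, h'⟩; exact Or.inl h; exact Or.inr ⟨h, by omega⟩)]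
        · rw [if_neg hc, if_neg ?_]
          rintro (h | ⟨rfl, h⟩)
          · exact hc (Or.inl h)
          · rcases Nat.lt_succ_iff_lt_or_eq.mp h with h' | h'
            · exact hc (Or.inr ⟨rfl, h'⟩)
            · exact hij ⟨h', by omega⟩

theorem pvMInv_inner (p : List Char) (L : Nat) (M : List (List Int))
    (h1 : 1 ≤ L) (hL : L < p.length) (hM : pvMInv p L M) :
    pvMInv p (L+1) (pvInner p (L+1) M) := by
  have hcnt : p.length - (L+1) + 1 = p.length - L := by omega
  obtain ⟨g1, g2, g3⟩ := pvMInv_inner_partial p L M h1 hL hM (p.length - L) le_rfl _ rfl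
  have hbr : pvInner p (L+1) M = (List.range (p.length - L)).foldl (pvAStep p L) M := by
    unfold pvInner pvAStep
    rw [hcnt]
  rw [hbr]
  refine ⟨g1, g2, ?_⟩
  · intro i j hi hj
    rw [g3 i j hi hj]
    by_cases hc : j + 1 - i ≤ L + 1
    · rw [if_pos ?_, if_pos hc]
      by_cases h' : j + 1 - i ≤ L
      · exact Or.inl h'
      · have hij : j = i + L := by omega
        exact Or.inr ⟨hij, by omega⟩
    · rw [if_neg (by rintro (h | ⟨rfl, h⟩) <;> omega), if_neg hc]

theorem pvMInv_outer (p : List Char) (m : Nat) (hm : m ≤ p.length - 1) (M : List (List Int))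
    (hM : pvMInv p 1 M) :
    pvMInv p (1 + m) ((List.range' 2 m).foldl (fun m sublen => pvInner p sublen m) M) := by
  induction m with
  | zero => simpa using hM
  | succ m ih =>
    rw [show List.range' 2 (m+1) = List.range' 2 m ++ [2+m] from by simpa using (List.range'_concat (s := 2) (n := m) (step := 1))]
    rw [List.foldl_append, List.foldl_cons, List.foldl_nil]
    have h := pvMInv_inner p (1+m) _ (by omega) (by omega) (ih (by omega))
    rw [show (2 + m) = (1 + m) + 1 from by omega]
    exact h

theorem pvA_eq (palavra : String) (h : palavra ≠ "") :
    encontrar_maior_plindromo palavra = (pvG palavra.toList : Int) := by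
  have hp : palavra.toList ≠ [] := by
    simp only [ne_eq, String.toList_eq_nil_iff]
    exact h
  have hn : 1 ≤ palavra.toList.length := by
    cases hl : palavra.toList with
    | nil => exact absurd hl hp
    | cons a l => simp
  unfold encontrar_maior_plindromo
  obtain ⟨h1, h2, h3⟩ := pvMInv_outer palavra.toList (palavra.toList.length - 1) le_rfl _
    (pvMInv_diag palavra.toList)
  rw [h3 0 (palavra.toList.length - 1) (by omega) (by omega)]
  rw [if_pos (by omega), pvSeg_full _ hp]

-- ===== B-side: the first-char-matching recurrence =====

def pvF : List Char → Nat
  | [] => 0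
  | x :: u =>
    max (pvF u)
      ((List.range u.length).attach.foldl
        (fun acc k => if u.getD k.1 ' ' = x then max acc (2 + pvF (u.take k.1)) else acc) 1)
termination_by l => l.length
decreasing_by
  all_goals simp_all [List.length_take, List.mem_range]

-- plain (non-attach) form of pvF's inner fold
def pvFold (x : Char) (u : List Char) (n : Nat) (acc : Nat) : Nat :=
  (List.range n).foldl (fun acc k => if u.getD k ' ' = x then max acc (2 + pvF (u.take k)) else acc) acc

theorem pvF_cons (x : Char) (u : List Char) :
    pvF (x :: u) = max (pvF u) (pvFold x u u.length 1) := by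
  rw [pvFold]
  conv_lhs => rw [pvF]
  congr 1
  exact List.foldl_attach (l := List.range u.length)
    (f := fun acc k => if u.getD k ' ' = x then max acc (2 + pvF (u.take k)) else acc) (b := 1)


-- basic facts about the inner fold
theorem pvFold_succ (x : Char) (u : List Char) (n acc : Nat) :
    pvFold x u (n+1) acc
      = (if u.getD n ' ' = x then max (pvFold x u n acc) (2 + pvF (u.take n))
         else pvFold x u n acc) := by
  rw [pvFold, pvFold, List.range_succ, List.foldl_append, List.foldl_cons, List.foldl_nil]

theorem pvFold_acc_le (x : Char) (u : List Char) (n : Nat) : ∀ acc, acc ≤ pvFold x u n acc := by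
  induction n with
  | zero => intro acc; rw [pvFold]; simp
  | succ n ih =>
    intro acc
    rw [pvFold_succ]
    split
    · exact le_trans (ih acc) (le_max_left _ _)
    · exact ih acc

theorem pvFold_candidate (x : Char) (u : List Char) (n k : Nat) (hk : k < n)
    (hc : u.getD k ' ' = x) (acc : Nat) : 2 + pvF (u.take k) ≤ pvFold x u n acc := by
  induction n with
  | zero => omega
  | succ n ih =>
    rw [pvFold_succ]
    by_cases hkn : k < n
    · have := ih hkn
      split
      · exact le_trans this (le_max_left _ _)
      · exact this
    · have hk' : k = n := by omega
      subst hk'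
      rw [if_pos hc]
      exact le_max_right _ _

theorem pvFold_cases (x : Char) (u : List Char) (n : Nat) (acc : Nat) :
    pvFold x u n acc = acc ∨
      ∃ k, k < n ∧ u.getD k ' ' = x ∧ pvFold x u n acc = 2 + pvF (u.take k) := by
  induction n with
  | zero => left; rw [pvFold]; simp
  | succ n ih =>
    rw [pvFold_succ]
    split
    · rename_i hc
      rcases max_choice (pvFold x u n acc) (2 + pvF (u.take n)) with h | h
      · rw [h]
        rcases ih with h' | ⟨k, hk, hck, hval⟩
        · left; exact h'
        · right; exact ⟨k, by omega, hck, hval⟩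
      · rw [h]
        right
        exact ⟨n, by omega, hc, rfl⟩
    · rcases ih with h' | ⟨k, hk, hck, hval⟩
      · left; exact h'
      · right; exact ⟨k, by omega, hck, hval⟩

theorem pvF_tail_le (x : Char) (u : List Char) : pvF u ≤ pvF (x :: u) := by
  rw [pvF_cons]; exact le_max_left _ _

theorem pvF_one_le (x : Char) (u : List Char) : 1 ≤ pvF (x :: u) := by
  rw [pvF_cons]
  exact le_trans (pvFold_acc_le x u u.length 1) (le_max_right _ _)

-- sublist case analyses
theorem sub_cons_cases {w : List Char} {x : Char} {t : List Char} (h : w.Sublist (x :: t)) :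
    w.Sublist t ∨ ∃ w', w = x :: w' ∧ w'.Sublist t := by
  cases h with
  | cons _ h => exact Or.inl h
  | cons₂ _ h => exact Or.inr ⟨_, rfl, h⟩

theorem snoc_sub_snoc {l t : List Char} {x : Char} (h : (l ++ [x]).Sublist (t ++ [x])) :
    l.Sublist t := by
  have h' := h.reverse
  rw [List.reverse_append, List.reverse_append] at h'
  simp only [List.reverse_cons, List.reverse_nil, List.nil_append] at h'
  have h2 := List.cons_sublist_cons.mp h'
  have := h2.reverse
  simpa using this

theorem snoc_sub_snoc_ne {l t : List Char} {x z : Char} (h : (l ++ [x]).Sublist (t ++ [z]))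
    (hne : x ≠ z) : (l ++ [x]).Sublist t := by
  have h' := h.reverse
  rw [List.reverse_append, List.reverse_append] at h'
  simp only [List.reverse_cons, List.reverse_nil, List.nil_append] at h'
  cases h' with
  | cons _ h2 =>
    have := h2.reverse
    simpa using this
  | cons₂ _ h2 => exact absurd rfl hne

theorem split_of_snoc_sublist {l u : List Char} {x : Char} (h : (l ++ [x]).Sublist u) :
    ∃ v w, u = v ++ x :: w ∧ l.Sublist v := by
  induction u generalizing l with
  | nil =>
    rw [List.sublist_nil] at h
    exact absurd (congrArg List.length h) (by simp)
  | cons y u' ih =>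
    rcases sub_cons_cases h with h2 | ⟨w', hw, h2⟩
    · obtain ⟨v, w, huv, hlv⟩ := ih h2
      exact ⟨y :: v, w, by rw [huv]; simp, hlv.cons y⟩
    · cases l with
      | nil =>
        simp only [List.nil_append, List.cons.injEq] at hw
        exact ⟨[], u', by rw [hw.1]; simp, List.Sublist.refl []⟩
      | cons a l' =>
        simp only [List.cons_append, List.cons.injEq] at hw
        obtain ⟨rfl, hw2⟩ := hw
        rw [← hw2] at h2
        obtain ⟨v, w, huv, hlv⟩ := ih h2
        exact ⟨a :: v, w, by rw [huv]; simp, List.cons_sublist_cons.mpr hlv⟩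

-- a nonempty palindrome starting with x also ends with x, with a palindromic middle
theorem pal_snoc {x : Char} {w₁ : List Char} (hp : (x :: w₁).Palindrome) (hne : w₁ ≠ []) :
    ∃ w₂, w₁ = w₂ ++ [x] ∧ w₂.Palindrome := by
  obtain ⟨w₂, c, hw⟩ : ∃ w₂ c, w₁ = w₂ ++ [c] :=
    ⟨w₁.dropLast, w₁.getLast hne, (List.dropLast_concat_getLast hne).symm⟩
  have hr := hp.reverse_eq
  rw [hw] at hr ⊢
  rw [List.reverse_cons, List.reverse_append] at hr
  simp only [List.reverse_cons, List.reverse_nil, List.nil_append, List.cons_append] at hr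
  rw [List.cons.injEq] at hr
  obtain ⟨hc, htail⟩ := hr
  subst hc
  have hrev : w₂.reverse = w₂ := by
    have := congrArg List.dropLast htail
    simpa using this
  exact ⟨w₂, rfl, List.Palindrome.of_reverse_eq hrev⟩

theorem pvG_pos (s : List Char) (hne : s ≠ []) (hs : ∀ c ∈ s, c ≠ 'a') : 1 ≤ pvG s := by
  generalize hn : s.length = n
  induction n using Nat.strong_induction_on generalizing s with
  | _ n ih =>
    match s, hne, hn with
    | [x], _, hn =>
      have hx := hs x (by simp)
      simp [pvG, hx]
    | x :: y :: rest, _, hn =>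
      have hdl : (x :: y :: rest).dropLast = x :: (y :: rest).dropLast := rfl
      have h1 : 1 ≤ pvG ((x :: y :: rest).dropLast) := by
        refine ih ((x :: y :: rest).dropLast).length ?_ _ (by simp [hdl]) ?_ rfl
        · simp only [List.length_dropLast, List.length_cons]
          simp only [List.length_cons] at hn
          omega
        · intro c hc
          exact hs c (List.Sublist.mem hc (List.dropLast_sublist _))
      exact le_trans h1 (pvG_bounds (x :: y :: rest)).2.1

-- any palindromic sublist is counted by pvG (on 'a'-free lists)
theorem pal_le_pvG (s : List Char) (hs : ∀ c ∈ s, c ≠ 'a') (w : List Char)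
    (hp : w.Palindrome) (hsub : w.Sublist s) : w.length ≤ pvG s := by
  generalize hn : s.length = n
  induction n using Nat.strong_induction_on generalizing s w with
  | _ n ih =>
    match s, hn with
    | [], _ =>
      rw [List.sublist_nil] at hsub
      simp [hsub]
    | [x], _ =>
      have hx := hs x (by simp)
      have h1 : w.length ≤ 1 := hsub.length_le
      have hg : pvG [x] = 1 := by simp [pvG, hx]
      omega
    | x :: y :: rest, hn =>
      set xs := y :: rest with hxsdef
      have hxs : xs ≠ [] := by simp [hxsdef]
      set z := xs.getLast hxs with hz
      set m := xs.dropLast with hm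
      have hsplit : m ++ [z] = xs := List.dropLast_concat_getLast hxs
      have hn2 : n = rest.length + 2 := by simpa using hn.symm
      have hlen : xs.length = n - 1 := by simp [hxsdef]; omega
      have hlenm : m.length = n - 2 := by
        have := congrArg List.length hsplit; simp [hlen] at this; omega
      have hmemxs : ∀ c ∈ xs, c ≠ 'a' := fun c hc => hs c (by simp [hc])
      have hmemm : ∀ c ∈ m, c ≠ 'a' := fun c hc =>
        hmemxs c (List.Sublist.mem hc (hsplit ▸ List.sublist_append_left m [z]))
      have hx : x ≠ 'a' := hs x (by simp)
      rcases sub_cons_cases hsub with h2 | ⟨w₁, hw, h2⟩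
      · have h3 := ih (n-1) (by omega) xs hmemxs w hp h2 hlen
        have h4 : pvG xs ≤ pvG (x :: xs) := by
          have := (pvG_bounds (x :: xs)).1
          simpa using this
        omega
      · subst hw
        by_cases h1 : w₁ = []
        · subst h1
          have : (1:Nat) ≤ pvG (x :: xs) := pvG_pos _ (by simp) hs
          simpa using this
        · obtain ⟨w₂, hw₂, hpw₂⟩ := pal_snoc hp h1
          subst hw₂
          rw [← hsplit] at h2
          by_cases hxz : x = z
          · rw [← hxz] at h2 hsplit
            have h3 : w₂.Sublist m := snoc_sub_snoc h2
            have h4 := ih (n-2) (by omega) m hmemm w₂ hpw₂ h3 hlenm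
            have h5 : pvG (x :: xs) = pvG m + 2 := by
              rw [show x :: xs = x :: m ++ [x] from by rw [← hsplit]; simp, pvG_pal x m hx]
            rw [h5]
            simp
            omega
          · have h3 : (w₂ ++ [x]).Sublist m := snoc_sub_snoc_ne h2 hxz
            have h4 : (x :: (w₂ ++ [x])).Sublist (x :: m) :=
              List.cons_sublist_cons.mpr h3
            have hmemxm : ∀ c ∈ x :: m, c ≠ 'a' := by
              intro c hc
              rcases List.mem_cons.mp hc with rfl | hc
              · exact hx
              · exact hmemm c hc
            have h5 := ih (n-1) (by omega) (x :: m) hmemxm (x :: (w₂ ++ [x])) hp h4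
              (by simp [hlenm]; omega)
            have h6 : pvG (x :: m) ≤ pvG (x :: xs) := by
              rw [show x :: xs = x :: m ++ [z] from by rw [← hsplit]; simp,
                  pvG_max x z m (by tauto)]
              exact le_max_right _ _
            omega

-- pvG is witnessed by some palindromic sublist
theorem exists_pal_pvG (s : List Char) (hs : ∀ c ∈ s, c ≠ 'a') :
    ∃ w : List Char, w.Palindrome ∧ w.Sublist s ∧ pvG s ≤ w.length := by
  generalize hn : s.length = n
  induction n using Nat.strong_induction_on generalizing s with
  | _ n ih =>
    match s, hn with
    | [], _ => exact ⟨[], List.Palindrome.nil, List.Sublist.refl _, by simp [pvG]⟩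
    | [x], _ =>
      refine ⟨[x], List.Palindrome.singleton x, List.Sublist.refl _, ?_⟩
      have hx := hs x (by simp)
      simp [pvG, hx]
    | x :: y :: rest, hn =>
      set xs := y :: rest with hxsdef
      have hxs : xs ≠ [] := by simp [hxsdef]
      set z := xs.getLast hxs with hz
      set m := xs.dropLast with hm
      have hsplit : m ++ [z] = xs := List.dropLast_concat_getLast hxs
      have hn2 : n = rest.length + 2 := by simpa using hn.symm
      have hlen : xs.length = n - 1 := by simp [hxsdef]; omega
      have hlenm : m.length = n - 2 := by
        have := congrArg List.length hsplit; simp [hlen] at this; omega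
      have hmemxs : ∀ c ∈ xs, c ≠ 'a' := fun c hc => hs c (by simp [hc])
      have hmemm : ∀ c ∈ m, c ≠ 'a' := fun c hc =>
        hmemxs c (List.Sublist.mem hc (hsplit ▸ List.sublist_append_left m [z]))
      have hx : x ≠ 'a' := hs x (by simp)
      by_cases hxz : x = z
      · obtain ⟨p, hp, hpsub, hple⟩ := ih (n-2) (by omega) m hmemm hlenm
        refine ⟨x :: (p ++ [x]), List.Palindrome.cons_concat x hp, ?_, ?_⟩
        · rw [show x :: xs = x :: (m ++ [x]) from by rw [← hsplit, hxz]]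

          exact List.cons_sublist_cons.mpr (hpsub.append (List.Sublist.refl [x]))
        · rw [show x :: xs = x :: m ++ [x] from by rw [← hsplit, hxz]; simp, pvG_pal x m hx]
          simp
          omega
      · obtain ⟨p1, hp1, hp1sub, hp1le⟩ := ih (n-1) (by omega) xs hmemxs hlen
        have hmemxm : ∀ c ∈ x :: m, c ≠ 'a' := by
          intro c hc
          rcases List.mem_cons.mp hc with rfl | hc
          · exact hx
          · exact hmemm c hc
        obtain ⟨p2, hp2, hp2sub, hp2le⟩ := ih (n-1) (by omega) (x :: m) hmemxm
          (by simp [hlenm]; omega)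
        have hmax : pvG (x :: xs) = max (pvG xs) (pvG (x :: m)) := by
          rw [show x :: xs = x :: m ++ [z] from by rw [← hsplit]; simp]
          rw [pvG_max x z m (by tauto)]
          rw [show m ++ [z] = xs from hsplit]
        rcases le_total (pvG xs) (pvG (x :: m)) with hle | hle
        · refine ⟨p2, hp2, ?_, ?_⟩
          · refine hp2sub.trans ?_
            rw [show x :: xs = x :: (m ++ [z]) from by rw [← hsplit]]

            exact List.cons_sublist_cons.mpr (List.sublist_append_left m [z])
          · rw [hmax]; omega
        · refine ⟨p1, hp1, (hp1sub.trans (List.sublist_cons_self x xs)), ?_⟩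
          rw [hmax]; omega

-- any palindromic sublist is counted by pvF
theorem pal_le_pvF (s : List Char) (w : List Char) (hp : w.Palindrome)
    (hsub : w.Sublist s) : w.length ≤ pvF s := by
  generalize hn : s.length = n
  induction n using Nat.strong_induction_on generalizing s w with
  | _ n ih =>
    match s, hn with
    | [], _ =>
      rw [List.sublist_nil] at hsub
      simp [hsub, pvF]
    | x :: u, hn =>
      rcases sub_cons_cases hsub with h2 | ⟨w₁, hw, h2⟩
      · exact le_trans (ih u.length (by simp at hn; omega) u w hp h2 rfl) (pvF_tail_le x u)
      · by_cases h1 : w₁ = []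
        · subst h1
          rw [hw]
          simpa using pvF_one_le x u
        · rw [hw] at hp
          obtain ⟨w₂, hw₂, hpw₂⟩ := pal_snoc hp h1
          rw [hw₂] at h2
          obtain ⟨v, rest, huv, hwv⟩ := split_of_snoc_sublist h2
          have hvlen : v.length < u.length := by
            have := congrArg List.length huv
            simp at this
            omega
          have h4 := ih v.length (by simp at hn; omega) v w₂ hpw₂ hwv rfl
          have hcand : 2 + pvF v ≤ pvFold x u u.length 1 := by
            refine pvFold_candidate x u u.length v.length hvlen ?_ 1 |>.trans_eq' ?_
            · rw [huv, List.getD, List.getElem?_append_right (le_refl _)]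
              simp
            · rw [huv, List.take_left]
          rw [hw, hw₂, pvF_cons]
          simp only [List.length_cons, List.length_append, List.length_nil, List.length_singleton]
          have : pvFold x u u.length 1 ≤ max (pvF u) (pvFold x u u.length 1) := le_max_right _ _
          omega

-- pvF is witnessed by some palindromic sublist
theorem exists_pal_pvF (s : List Char) :
    ∃ w : List Char, w.Palindrome ∧ w.Sublist s ∧ pvF s ≤ w.length := by
  generalize hn : s.length = n
  induction n using Nat.strong_induction_on generalizing s with
  | _ n ih =>
    match s, hn with
    | [], _ => exact ⟨[], List.Palindrome.nil, List.Sublist.refl _, by simp [pvF]⟩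
    | x :: u, hn =>
      obtain ⟨p1, hp1, hp1sub, hp1le⟩ := ih u.length (by simp at hn; omega) u rfl
      have hB : ∃ w : List Char, w.Palindrome ∧ w.Sublist (x :: u) ∧ pvFold x u u.length 1 ≤ w.length := by
        rcases pvFold_cases x u u.length 1 with h | ⟨k, hk, hck, hval⟩
        · exact ⟨[x], List.Palindrome.singleton x, List.cons_sublist_cons.mpr
            (List.nil_sublist u), by rw [h]; simp⟩
        · obtain ⟨p, hp, hpsub, hple⟩ := ih (u.take k).length
            (by simp at hn ⊢; omega) (u.take k) rfl
          refine ⟨x :: (p ++ [x]), List.Palindrome.cons_concat x hp, ?_, ?_⟩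
          · refine List.cons_sublist_cons.mpr ?_
            have hdrop : u.drop k = x :: u.drop (k+1) := by
              rw [List.drop_eq_getElem_cons hk]
              congr 1
              rw [List.getD_eq_getElem _ _ hk] at hck
              exact hck
            have hs2 : (p ++ [x]).Sublist (u.take k ++ (x :: u.drop (k+1))) :=
              hpsub.append (List.cons_sublist_cons.mpr (List.nil_sublist _))
            have hueq : u.take k ++ (x :: u.drop (k+1)) = u := by
              rw [← hdrop, List.take_append_drop]
            exact hueq ▸ hs2
          · rw [hval]
            simp
            omega
      obtain ⟨p2, hp2, hp2sub, hp2le⟩ := hB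
      rw [pvF_cons]
      rcases le_total (pvF u) (pvFold x u u.length 1) with hle | hle
      · exact ⟨p2, hp2, hp2sub, by rw [max_eq_right hle]; omega⟩
      · exact ⟨p1, hp1, hp1sub.trans (List.sublist_cons_self x u), by rw [max_eq_left hle]; omega⟩


-- ===== correctness of B's port against pvF =====

theorem pvFold_zero (x : Char) (u : List Char) (acc : Nat) : pvFold x u 0 acc = acc := by
  rw [pvFold]; simp

theorem getD_drop' (s : List Char) (m k : Nat) :
    (s.drop m).getD k ' ' = s.getD (m + k) ' ' := by
  rw [List.getD, List.getD, List.getElem?_drop]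

theorem getD_take' (s : List Char) (m k : Nat) (h : k < m) :
    (s.take m).getD k ' ' = s.getD k ' ' := by
  rw [List.getD, List.getD, List.getElem?_take, if_pos h]

theorem drop_cons_getD (s : List Char) (i : Nat) (h : i < s.length) :
    s.drop i = s.getD i ' ' :: s.drop (i+1) := by
  rw [List.drop_eq_getElem_cons h, List.getD_eq_getElem _ _ h]

theorem pvFold_take (x : Char) (u : List Char) (m : Nat) :
    ∀ t acc, t ≤ m → pvFold x (u.take m) t acc = pvFold x u t acc := by
  intro t
  induction t with
  | zero => intro acc _; rw [pvFold_zero, pvFold_zero]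
  | succ t ih =>
    intro acc ht
    rw [pvFold_succ, pvFold_succ, ih acc (by omega), getD_take' u m t (by omega),
        List.take_take, min_eq_left (by omega : t ≤ m)]

-- pvF of a prefix of a suffix, unfolded one step
theorem pvF_seg_step (s : List Char) (i t : Nat) (hi : i < s.length) (ht : t ≤ s.length - (i+1)) :
    pvF ((s.drop i).take (t+1))
      = max (pvF ((s.drop (i+1)).take t))
            (pvFold (s.getD i ' ') (s.drop (i+1)) t 1) := by
  rw [drop_cons_getD s i hi]
  rw [List.take_succ_cons, pvF_cons]
  have hlen : ((s.drop (i+1)).take t).length = t := by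
    rw [List.length_take]
    simp
    omega
  rw [hlen, pvFold_take _ _ t t 1 le_rfl]

-- invariant of B's row list: row i holds pvF of every prefix of s.drop i
def pvBInv (s : List Char) (i : Nat) (nxt : List Int) : Prop :=
  nxt.length = s.length + 1 ∧
  ∀ j, i ≤ j → j ≤ s.length → nxt.getD j 0 = (pvF ((s.drop i).take (j - i)) : Int)

theorem pvBRow_partial (s : List Char) (i : Nat) (hi : i < s.length) (nxt : List Int)
    (hnxt : pvBInv s (i+1) nxt) (t : Nat) (ht : t ≤ s.length - i) :
    ∀ st : List Int × Int,
      st = (List.range' (i+1) t).foldl (fun (p : List Int × Int) j =>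
        let cur := p.1.set j (max (nxt.getD j 0) p.2)
        let run := if j < s.length ∧ s.getD j ' ' = s.getD i ' '
                   then max p.2 (2 + nxt.getD j 0) else p.2
        (cur, run)) (List.replicate (s.length+1) 0, 1) →
      st.1.length = s.length + 1 ∧
      (∀ j, j ≤ i → st.1.getD j 0 = 0) ∧
      (∀ j, i+1 ≤ j → j < i+1+t → st.1.getD j 0 = (pvF ((s.drop i).take (j - i)) : Int)) ∧
      st.2 = ((pvFold (s.getD i ' ') (s.drop (i+1)) (min t (s.length - (i+1))) 1 : Nat) : Int) := by
  obtain ⟨hlen, hval⟩ := hnxt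
  induction t with
  | zero =>
    intro st hst
    simp only [List.range'_zero, List.foldl_nil] at hst
    subst hst
    refine ⟨by simp, ?_, ?_, ?_⟩
    · intro j _; rw [getD_replicate']; split <;> rfl
    · intro j h1 h2; omega
    · rw [min_eq_left (by omega), pvFold_zero]; rfl
  | succ t ih =>
    intro st hst
    obtain ⟨g1, g2, g3, g4⟩ := ih (by omega) _ rfl
    rw [show List.range' (i+1) (t+1) = List.range' (i+1) t ++ [(i+1)+t] from by
          simpa using (List.range'_concat (s := i+1) (n := t) (step := 1)),
        List.foldl_append, List.foldl_cons, List.foldl_nil] at hst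
    set prev := (List.range' (i+1) t).foldl (fun (p : List Int × Int) j =>
        let cur := p.1.set j (max (nxt.getD j 0) p.2)
        let run := if j < s.length ∧ s.getD j ' ' = s.getD i ' '
                   then max p.2 (2 + nxt.getD j 0) else p.2
        (cur, run)) (List.replicate (s.length+1) 0, 1) with hprev
    set j0 := i + 1 + t with hj0
    have hj0n : j0 ≤ s.length := by omega
    have htu : t ≤ s.length - (i+1) := by omega
    have hminl : min t (s.length - (i+1)) = t := min_eq_left (by omega)
    have hnj0 : nxt.getD j0 0 = (pvF ((s.drop (i+1)).take t) : Int) := by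
      rw [hval j0 (by omega) hj0n, show j0 - (i+1) = t from by omega]
    have hcur : st.1 = prev.1.set j0 ((pvF ((s.drop i).take (t+1)) : Nat) : Int) := by
      rw [hst]
      simp only
      congr 1
      rw [hnj0, g4, hminl, pvF_seg_step s i t hi htu]
      push_cast
      rfl
    refine ⟨?_, ?_, ?_, ?_⟩
    · rw [hcur, List.length_set]; exact g1
    · intro j hj
      rw [hcur, getD_set_ne _ _ _ _ _ (by omega)]
      exact g2 j hj
    · intro j hj1 hj2
      by_cases hjj : j = j0
      · subst hjj
        rw [hcur, getD_set_self _ _ _ _ (by rw [g1]; omega),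
            show j0 - i = t + 1 from by omega]
      · rw [hcur, getD_set_ne _ _ _ _ _ hjj]
        exact g3 j hj1 (by omega)
    · have hrun : st.2 = if j0 < s.length ∧ s.getD j0 ' ' = s.getD i ' '
          then max prev.2 (2 + nxt.getD j0 0) else prev.2 := by
        rw [hst]
      by_cases hcase : j0 < s.length
      · have hmin1 : min (t+1) (s.length - (i+1)) = t + 1 := by omega
        have hgd : s.getD j0 ' ' = (s.drop (i+1)).getD t ' ' := by
          rw [getD_drop']
        rw [hrun, hmin1, pvFold_succ]
        by_cases hcc : (s.drop (i+1)).getD t ' ' = s.getD i ' '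
        · rw [if_pos ⟨hcase, by rw [hgd]; exact hcc⟩, if_pos hcc, g4, hminl, hnj0]
          push_cast
          rfl
        · rw [if_neg (by rw [hgd]; tauto), if_neg hcc, g4, hminl]
      · have : j0 = s.length := by omega
        have hmin1 : min (t+1) (s.length - (i+1)) = min t (s.length - (i+1)) := by
          rw [min_eq_right (by omega), min_eq_left (by omega)]
          omega
        rw [hrun, if_neg (by tauto), g4, hmin1]

theorem pvBRow_spec (s : List Char) (i : Nat) (hi : i < s.length) (nxt : List Int)
    (h : pvBInv s (i+1) nxt) : pvBInv s i (pvBRow s s.length i nxt).1 := by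
  have hrow : (pvBRow s s.length i nxt)
      = (List.range' (i+1) (s.length - i)).foldl (fun (p : List Int × Int) j =>
        let cur := p.1.set j (max (nxt.getD j 0) p.2)
        let run := if j < s.length ∧ s.getD j ' ' = s.getD i ' '
                   then max p.2 (2 + nxt.getD j 0) else p.2
        (cur, run)) (List.replicate (s.length+1) 0, 1) := by
    rw [pvBRow]
  obtain ⟨g1, g2, g3, _⟩ := pvBRow_partial s i hi nxt h (s.length - i) le_rfl
    (pvBRow s s.length i nxt) hrow
  refine ⟨g1, ?_⟩
  intro j hj1 hj2
  by_cases hji : j = i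
  · subst hji
    rw [g2 j le_rfl]
    simp [pvF]
  · rw [g3 j (by omega) (by omega)]

theorem pvBInv_all (s : List Char) (k : Nat) (hk : k ≤ s.length) (nxt : List Int)
    (h : pvBInv s k nxt) :
    pvBInv s 0 (((List.range k).reverse).foldl
      (fun nxt i => (pvBRow s s.length i nxt).1) nxt) := by
  induction k generalizing nxt with
  | zero => simpa using h
  | succ k ih =>
    rw [show (List.range (k+1)).reverse = k :: (List.range k).reverse from by
          rw [List.range_succ]; simp]
    rw [List.foldl_cons]
    exact ih (by omega) _ (pvBRow_spec s k (by omega) nxt h)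

theorem pvB_eq (palavra : String) :
    encontrar_maior_plindromo_alt palavra
      = (pvF (palavra.toList.filter (fun c => c ≠ 'a')) : Int) := by
  unfold encontrar_maior_plindromo_alt
  set s := palavra.toList.filter (fun c => c ≠ 'a') with hsdef
  have hbase : pvBInv s s.length (List.replicate (s.length+1) 0) := by
    refine ⟨by simp, ?_⟩
    intro j h1 h2
    have hj : j = s.length := by omega
    subst hj
    rw [getD_replicate', if_pos (by omega)]
    simp [pvF]
  obtain ⟨h1, h2⟩ := pvBInv_all s s.length le_rfl _ hbase
  rw [h2 s.length (by omega) le_rfl]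
  simp


theorem pvGF (s : List Char) (hs : ∀ c ∈ s, c ≠ 'a') : pvG s = pvF s := by
  refine le_antisymm ?_ ?_
  · obtain ⟨w, hp, hsub, hle⟩ := exists_pal_pvG s hs
    exact le_trans hle (pal_le_pvF s w hp hsub)
  · obtain ⟨w, hp, hsub, hle⟩ := exists_pal_pvF s
    exact le_trans hle (pal_le_pvG s hs w hp hsub)

-- ===== VERDICT (by name: the statement is the Claim_ definition above) =====
theorem encontrar_maior_plindromo_spec : Claim_equal_encontrar_maior_plindromo := by
  intro palavra _ hpre
  unfold Spec_encontrar_maior_plindromo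
  rw [pvA_eq palavra hpre, pvB_eq palavra, pvG_filter palavra.toList,
      pvGF _ (by intro c hc; simpa using (List.of_mem_filter hc))]
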